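-- pv_equiv track=rewrite | github.com/jihye0526/2023_Algorithm | 프로그래머스/Lv2/디펜스 게임(X).py | solution
-- ===== SOURCE A (Python) =====
-- import heapq
--
-- def solution(n, k, enemy):
--     priority = []
--
--     if k >= len(enemy): return len(enemy)
--
--     for i in range(len(enemy)):
--         heapq.heappush(priority, enemy[i])
--
--         if len(priority) > k:
--             last = heapq.heappop(priority)
--
--             if last > n:
--                 return i
--
--             n -= last
--
--     return len(enemy)
-- ===== SOURCE B (Python) =====
-- def solution(n, k, enemy):
--     # Brute force: for each round count m past the free k rounds, re-sort the
--     # prefix and check whether paying all but the k largest stays within n.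
--     if k >= len(enemy):
--         return len(enemy)
--     for m in range(max(k, 0) + 1, len(enemy) + 1):
--         if sum(sorted(enemy[:m])[:m - k]) > n:
--             return m - 1
--     return len(enemy)
-- ===== Notes on version B (the rewrite author's own statement) =====
-- stated objective: alternative
-- what changed: A's single-pass greedy with an incremental min-heap of the k shielded values is replaced by a direct per-prefix check: for each round count m past the free k rounds, re-sort the prefix enemy[:m] and test whether the sum of all but its k largest values exceeds n.
import Mathlib
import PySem

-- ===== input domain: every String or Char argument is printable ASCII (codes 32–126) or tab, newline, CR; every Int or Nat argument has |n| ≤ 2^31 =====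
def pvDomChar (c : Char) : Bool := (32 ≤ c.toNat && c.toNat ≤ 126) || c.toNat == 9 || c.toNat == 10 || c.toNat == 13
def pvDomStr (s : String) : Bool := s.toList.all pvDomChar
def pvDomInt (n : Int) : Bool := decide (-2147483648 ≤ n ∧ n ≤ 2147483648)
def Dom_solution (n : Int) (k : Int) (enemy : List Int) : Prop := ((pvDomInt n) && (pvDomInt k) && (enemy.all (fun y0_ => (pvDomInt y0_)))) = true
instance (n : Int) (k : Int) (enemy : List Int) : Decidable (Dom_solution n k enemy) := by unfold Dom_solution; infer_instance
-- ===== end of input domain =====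

-- B replaces A's incremental min-heap greedy by a per-prefix brute force: for each
-- round count it re-sorts the prefix and checks the paid sum directly (alternative
-- decomposition, not faster).


-- ===== PORT A =====
-- heapq on ints, modelled as a sorted list: heappush = ordered insert, heappop =
-- (head, tail).  Exact for the observable behaviour A uses (heappop returns the
-- minimum of the pushed-minus-popped multiset; Int values equal under ≤ are equal).
def loopA (k : Int) (xs : List Int) (i : Int) (priority : List Int) (n : Int) (total : Int) : Int :=
  match xs with
  | [] => total
  | x :: rest =>
    let pr := List.orderedInsert (· ≤ ·) x priority      -- heapq.heappush(priority, enemy[i])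
    if (pr.length : Int) > k then
      let last := pr.headI                               -- last = heapq.heappop(priority)
      if last > n then i
      else loopA k rest (i + 1) pr.tail (n - last) total
    else loopA k rest (i + 1) pr n total

def solution (n : Int) (k : Int) (enemy : List Int) : Int :=
  if k ≥ (enemy.length : Int) then (enemy.length : Int)
  else loopA k enemy 0 [] n (enemy.length : Int)

-- ===== PORT B =====
-- sum(sorted(enemy[:m])[:m - k])
def costB (k : Int) (enemy : List Int) (m : Int) : Int :=
  (PySem.List.slice (PySem.List.sorted (PySem.List.slice enemy none (some m)) (fun x => x) false)
      none (some (m - k))).sum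

def loopB (n : Int) (k : Int) (enemy : List Int) (ms : List Int) : Int :=
  match ms with
  | [] => (enemy.length : Int)
  | m :: rest =>
    if costB k enemy m > n then m - 1
    else loopB n k enemy rest

def solution_alt (n : Int) (k : Int) (enemy : List Int) : Int :=
  if k ≥ (enemy.length : Int) then (enemy.length : Int)
  else loopB n k enemy (PySem.List.pyRange (max k 0 + 1) ((enemy.length : Int) + 1) 1)

-- ===== PRECONDITION & SPEC =====
def Spec_solution (n : Int) (k : Int) (enemy : List Int) (out : Int) : Prop := out = solution_alt n k enemy
instance (n : Int) (k : Int) (enemy : List Int) (out : Int) : Decidable (Spec_solution n k enemy out) := by unfold Spec_solution; infer_instance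

-- ===== CLAIM (what is proved, stated in full; the proofs are below) =====
def Claim_equal_solution : Prop := ∀ (n : Int) (k : Int) (enemy : List Int), Dom_solution n k enemy → Spec_solution n k enemy (solution n k enemy)

-- ===== LEMMAS AND PROOFS =====

-- abbreviation used only by the proofs
def srt (l : List Int) : List Int := PySem.List.sorted l (fun x => x) false

lemma oi_ne_nil (x : Int) (l : List Int) : List.orderedInsert (· ≤ ·) x l ≠ [] := by
  cases l with
  | nil => simp [List.orderedInsert]
  | cons y t => by_cases h : x ≤ y <;> simp [List.orderedInsert, h]

lemma oi_of_forall_le (x : Int) (l : List Int) (h : ∀ z ∈ l, x ≤ z) :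
    List.orderedInsert (· ≤ ·) x l = x :: l := by
  cases l with
  | nil => rfl
  | cons y t => simp [List.orderedInsert, h y (by simp)]

lemma srt_sorted (l : List Int) : (srt l).Pairwise (· ≤ ·) := by
  have := PySem.List.sorted_pairwise l (fun x => x)
  simpa [srt] using this

lemma srt_append_singleton (pre : List Int) (x : Int) :
    srt (pre ++ [x]) = List.orderedInsert (· ≤ ·) x (srt pre) := by
  apply PySem.List.sorted_id_eq_of_perm_of_pairwise
  · refine (List.perm_orderedInsert _ x (srt pre)).trans ?_
    refine ((PySem.List.sorted_perm pre (fun x => x) false).cons x).trans ?_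
    exact (List.perm_append_singleton x pre).symm
  · exact List.Pairwise.orderedInsert x _ (srt_sorted pre)

-- the crux: pushing x into the kept suffix of a sorted list and popping the minimum
lemma ins_drop (x : Int) : ∀ (S : List Int) (j : Nat), S.Pairwise (· ≤ ·) →
    (List.orderedInsert (· ≤ ·) x (S.drop j)).headI + (S.take j).sum
        = ((List.orderedInsert (· ≤ ·) x S).take (j + 1)).sum
    ∧ (List.orderedInsert (· ≤ ·) x (S.drop j)).tail
        = (List.orderedInsert (· ≤ ·) x S).drop (j + 1) := by
  intro S
  induction S with
  | nil => intro j _; simp [List.orderedInsert]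
  | cons y S2 ih =>
    intro j hs
    have hyS2 : ∀ z ∈ S2, y ≤ z := fun z hz => List.rel_of_pairwise_cons hs hz
    have hs2 : S2.Pairwise (· ≤ ·) := List.Pairwise.of_cons hs
    cases j with
    | zero =>
      obtain ⟨a, t, h⟩ : ∃ a t, List.orderedInsert (· ≤ ·) x (y :: S2) = a :: t := by
        rcases hh : List.orderedInsert (· ≤ ·) x (y :: S2) with _ | ⟨a, t⟩
        · exact absurd hh (oi_ne_nil x _)
        · exact ⟨a, t, rfl⟩
      simp [h]
    | succ j' =>
      by_cases hxy : x ≤ y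
      · have hfront : List.orderedInsert (· ≤ ·) x (S2.drop j') = x :: S2.drop j' := by
          refine oi_of_forall_le x _ (fun z hz => ?_)
          exact le_trans hxy (hyS2 z (List.mem_of_mem_drop hz))
        have hoi : List.orderedInsert (· ≤ ·) x (y :: S2) = x :: y :: S2 := by
          simp [List.orderedInsert, hxy]
        refine ⟨?_, ?_⟩
        · rw [List.drop_succ_cons, hfront, hoi]
          simp only [List.take_succ_cons, List.sum_cons, List.headI]
        · rw [List.drop_succ_cons, hfront, hoi, List.tail_cons, List.drop_succ_cons,
            List.drop_succ_cons]
      · obtain ⟨ih1, ih2⟩ := ih j' hs2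
        constructor
        · have hoi : List.orderedInsert (· ≤ ·) x (y :: S2) = y :: List.orderedInsert (· ≤ ·) x S2 := by
            simp [List.orderedInsert, hxy]
          rw [hoi]
          simp only [List.drop_succ_cons, List.take_succ_cons, List.sum_cons]
          omega
        · have hoi : List.orderedInsert (· ≤ ·) x (y :: S2) = y :: List.orderedInsert (· ≤ ·) x S2 := by
            simp [List.orderedInsert, hxy]
          rw [List.drop_succ_cons, hoi, List.drop_succ_cons]
          exact ih2

lemma length_oi (x : Int) (l : List Int) :
    (List.orderedInsert (· ≤ ·) x l).length = l.length + 1 := by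
  simpa using (List.perm_orderedInsert (· ≤ ·) x l).length_eq

-- phase 2: from the first round on which a payment happens, the two loops agree
lemma loopA_eq_loopB (n k : Int) : ∀ (rest pre : List Int), k ≤ (pre.length : Int) →
    loopA k rest (pre.length : Int)
        ((srt pre).drop ((pre.length : Int) - k).toNat)
        (n - ((srt pre).take ((pre.length : Int) - k).toNat).sum)
        ((pre ++ rest).length : Int)
      = loopB n k (pre ++ rest)
          (PySem.List.pyRange ((pre.length : Int) + 1) (((pre ++ rest).length : Int) + 1) 1) := by
  intro rest
  induction rest with
  | nil =>
    intro pre hk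
    simp only [List.append_nil]
    rw [PySem.List.pyRange_one_eq_nil (by omega)]
    simp [loopA, loopB]
  | cons x rs ih =>
    intro pre hk
    set dp := ((pre.length : Int) - k).toNat with hdp
    have hlen : ((pre ++ x :: rs).length : Int) = (pre.length : Int) + 1 + rs.length := by
      simp; omega
    obtain ⟨hsum, htail⟩ := ins_drop x (srt pre) dp (srt_sorted pre)
    have hlsrt : (srt pre).length = pre.length := by
      simp [srt]
    have hcond : ((List.orderedInsert (· ≤ ·) x ((srt pre).drop dp)).length : Int) > k := by
      rw [length_oi, List.length_drop, hlsrt]; omega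
    have hsrt' : srt (pre ++ [x]) = List.orderedInsert (· ≤ ·) x (srt pre) :=
      srt_append_singleton pre x
    -- the B-side cost at m = pre.length + 1
    have htake : PySem.List.slice (pre ++ x :: rs) none (some ((pre.length : Int) + 1)) = pre ++ [x] := by
      rw [show pre ++ x :: rs = (pre ++ [x]) ++ rs by simp,
        show ((pre.length : Int) + 1) = (((pre ++ [x]).length : Nat) : Int) by simp,
        PySem.List.slice_to_natCast]
      exact List.take_left' rfl
    have hcost : costB k (pre ++ x :: rs) ((pre.length : Int) + 1)
        = ((srt (pre ++ [x])).take (dp + 1)).sum := by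
      rw [costB, htake, PySem.List.slice_to _ (by omega)]
      unfold srt
      congr 2
      omega
    -- peel one element off B's range
    rw [PySem.List.pyRange_one_cons (by omega)]
    rw [loopA, loopB]
    simp only [hcond, if_pos, gt_iff_lt, hcost]
    have hval : (List.orderedInsert (· ≤ ·) x ((srt pre).drop dp)).headI
          > n - ((srt pre).take dp).sum
        ↔ ((srt (pre ++ [x])).take (dp + 1)).sum > n := by
      rw [hsrt']; omega
    by_cases hfail : ((srt (pre ++ [x])).take (dp + 1)).sum > n
    · rw [if_pos (hval.mpr hfail), if_pos hfail]; ring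
    · rw [if_neg (fun h => hfail (hval.mp h)), if_neg hfail]
      have hk' : k ≤ ((pre ++ [x]).length : Int) := by simp; omega
      have hdp' : ((((pre ++ [x]).length : Int)) - k).toNat = dp + 1 := by simp; omega
      have hn : n - (List.take dp (srt pre)).sum
            - (List.orderedInsert (· ≤ ·) x (List.drop dp (srt pre))).headI
          = n - (List.take (dp + 1) (List.orderedInsert (· ≤ ·) x (srt pre))).sum := by omega
      rw [htail, hn, show pre ++ x :: rs = (pre ++ [x]) ++ rs by simp,
        show ((pre.length : Int) + 1) = ((pre ++ [x]).length : Int) by simp]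
      have := ih (pre ++ [x]) hk'
      rw [hdp', hsrt'] at this
      exact this

-- phase 1: the first k rounds are free (no payment, heap only grows)
lemma loopA_free (n k : Int) : ∀ (rest pre : List Int), (pre.length : Int) < k →
    k < ((pre ++ rest).length : Int) →
    loopA k rest (pre.length : Int) (srt pre) n ((pre ++ rest).length : Int)
      = loopB n k (pre ++ rest)
          (PySem.List.pyRange (k + 1) (((pre ++ rest).length : Int) + 1) 1) := by
  intro rest
  induction rest with
  | nil => intro pre h1 h2; simp at h2; omega
  | cons x rs ih =>
    intro pre h1 h2
    have hlsrt : (srt pre).length = pre.length := by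
      simp [srt]
    have hcond : ¬ ((List.orderedInsert (· ≤ ·) x (srt pre)).length : Int) > k := by
      rw [length_oi, hlsrt]; omega
    rw [loopA]
    simp only [hcond, if_false]
    have hsrt' : srt (pre ++ [x]) = List.orderedInsert (· ≤ ·) x (srt pre) :=
      srt_append_singleton pre x
    have heq : pre ++ x :: rs = (pre ++ [x]) ++ rs := by simp
    by_cases hlast : ((pre ++ [x]).length : Int) < k
    · have := ih (pre ++ [x]) hlast (by rw [← heq]; exact h2)
      rw [← heq, show ((pre ++ [x]).length : Int) = (pre.length : Int) + 1 by simp, hsrt'] at this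
      exact this
    · -- pre.length + 1 = k : switch to phase 2
      have hk' : k ≤ ((pre ++ [x]).length : Int) := by omega
      have := loopA_eq_loopB n k rs (pre ++ [x]) hk'
      have hdp0 : ((((pre ++ [x]).length : Int)) - k).toNat = 0 := by simp; omega
      rw [hdp0] at this
      simp only [List.drop_zero, List.take_zero, List.sum_nil, sub_zero] at this
      rw [← heq, show ((pre ++ [x]).length : Int) = (pre.length : Int) + 1 by simp, hsrt'] at this
      rw [this]
      have hkeq : k = (pre.length : Int) + 1 := by simp at hlast; omega
      rw [hkeq]

-- ===== VERDICT (by name: the statement is the Claim_ definition above) =====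
theorem solution_spec : Claim_equal_solution := by
  intro n k enemy _
  unfold Spec_solution solution solution_alt
  by_cases hk : k ≥ (enemy.length : Int)
  · rw [if_pos hk, if_pos hk]
  · rw [if_neg hk, if_neg hk]
    by_cases hk0 : 0 < k
    · have := loopA_free n k enemy [] (by simpa using hk0) (by simpa using not_le.mp hk)
      simp only [List.nil_append, List.length_nil, Nat.cast_zero] at this
      rw [show srt [] = [] from rfl] at this
      rw [this]
      congr 2
      omega
    · have := loopA_eq_loopB n k enemy [] (by simp; omega)
      simp only [List.nil_append, List.length_nil, Nat.cast_zero] at this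
      rw [show ((0 : Int) - k).toNat = (-k).toNat from by ring_nf] at this
      rw [show srt [] = [] from rfl] at this
      simp only [List.drop_nil, List.take_nil, List.sum_nil, sub_zero] at this
      rw [this]
      congr 2
      omega
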